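-- pv_equiv track=rewrite | github.com/ishine/pvx | scripts/scripts_generate_html_docs.py | _split_top_level_once
-- ===== SOURCE A (Python) =====
-- def _split_top_level_once(text: str, delimiter: str = ",") -> tuple[str, str | None]:
--     depth = 0
--     quote: str | None = None
--     escaped = False
--     for idx, ch in enumerate(text):
--         if quote is not None:
--             if escaped:
--                 escaped = False
--                 continue
--             if ch == "\\":
--                 escaped = True
--                 continue
--             if ch == quote:
--                 quote = None
--             continue
--         if ch in ("'", '"'):
--             quote = ch
--             continue
--         if ch in "([{":
--             depth += 1
--             continue
--         if ch in ")]}":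
--             depth = max(0, depth - 1)
--             continue
--         if ch == delimiter and depth == 0:
--             return text[:idx], text[idx + 1 :]
--     return text, None
-- ===== SOURCE B (Python) =====
-- def _split_top_level_once(text: str, delimiter: str = ","):
--     # Pass 1: collect (index, char) for every character outside quoted sections.
--     outside = []
--     quote = None
--     escaped = False
--     for i, ch in enumerate(text):
--         if quote is not None:
--             if escaped:
--                 escaped = False
--             elif ch == "\\":
--                 escaped = True
--             elif ch == quote:
--                 quote = None
--         elif ch in "'\"":
--             quote = ch
--         else:
--             outside.append((i, ch))
--     # Pass 2: quote-free depth scan over the unquoted characters only.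
--     depth = 0
--     for i, ch in outside:
--         if ch in "([{":
--             depth += 1
--         elif ch in ")]}":
--             depth = max(0, depth - 1)
--         elif ch == delimiter and depth == 0:
--             return text[:i], text[i + 1:]
--     return text, None
-- ===== Notes on version B (the rewrite author's own statement) =====
-- stated objective: alternative
-- what changed: Replaces A's single fused scan (depth + quote + escaped state in one loop) by two staged passes: pass 1 filters quoted sections out into an intermediate list of (index,char) pairs, pass 2 is a quote-free depth scan over that list that finds the delimiter.
import Mathlib
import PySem

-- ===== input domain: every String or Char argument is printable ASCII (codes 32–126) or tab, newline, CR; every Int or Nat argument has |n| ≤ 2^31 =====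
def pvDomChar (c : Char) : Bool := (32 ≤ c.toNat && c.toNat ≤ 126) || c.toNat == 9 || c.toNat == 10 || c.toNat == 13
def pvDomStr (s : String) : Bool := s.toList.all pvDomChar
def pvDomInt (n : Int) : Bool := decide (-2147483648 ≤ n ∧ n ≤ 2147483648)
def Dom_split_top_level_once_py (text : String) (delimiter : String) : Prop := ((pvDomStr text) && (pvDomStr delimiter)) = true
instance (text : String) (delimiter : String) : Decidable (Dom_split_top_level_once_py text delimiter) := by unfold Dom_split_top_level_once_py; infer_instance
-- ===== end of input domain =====

-- B replaces A's single fused scan by two staged passes: filter out quoted sections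
-- into an intermediate (index, char) list, then a quote-free depth scan (objective: alternative).

-- ===== PORT A =====
-- A's for-loop over enumerate(text) with fused state (depth, quote, escaped),
-- transliterated as structural recursion over the character list carrying the index.
def pvAGo (text : String) (delimiter : String) :
    List Char → Nat → Int → Option Char → Bool → String × Option String
  | [], _, _, _, _ => (text, none)
  | c :: rest, idx, depth, quote, escaped =>
    match quote with
    | some q =>
      if escaped then pvAGo text delimiter rest (idx + 1) depth (some q) false
      else if c == '\\' then pvAGo text delimiter rest (idx + 1) depth (some q) true
      else if c == q then pvAGo text delimiter rest (idx + 1) depth none false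
      else pvAGo text delimiter rest (idx + 1) depth (some q) false
    | none =>
      if c == '\'' || c == '"' then pvAGo text delimiter rest (idx + 1) depth (some c) false
      else if c == '(' || c == '[' || c == '{' then
        pvAGo text delimiter rest (idx + 1) (depth + 1) none false
      else if c == ')' || c == ']' || c == '}' then
        pvAGo text delimiter rest (idx + 1) (max 0 (depth - 1)) none false
      else if String.singleton c == delimiter && depth == 0 then
        (PySem.Str.slice text none (some (idx : Int)),
         some (PySem.Str.slice text (some ((idx : Int) + 1)) none))
      else pvAGo text delimiter rest (idx + 1) depth none false

def split_top_level_once_py (text : String) (delimiter : String) : String × Option String :=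
  pvAGo text delimiter text.toList 0 0 none false

-- ===== PORT B =====
-- B's pass 1: the enumerate loop that appends (i, ch) for characters outside quotes.
def pvOutside : List Char → Nat → Option Char → Bool → List (Nat × Char)
  | [], _, _, _ => []
  | c :: rest, i, some q, escaped =>
    if escaped then pvOutside rest (i + 1) (some q) false
    else if c == '\\' then pvOutside rest (i + 1) (some q) true
    else if c == q then pvOutside rest (i + 1) none false
    else pvOutside rest (i + 1) (some q) false
  | c :: rest, i, none, _ =>
    if c == '\'' || c == '"' then pvOutside rest (i + 1) (some c) false
    else (i, c) :: pvOutside rest (i + 1) none false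

-- B's pass 2: the quote-free depth scan over the intermediate list.
def pvDepthScan (text : String) (delimiter : String) :
    List (Nat × Char) → Int → String × Option String
  | [], _ => (text, none)
  | (i, c) :: rest, depth =>
    if c == '(' || c == '[' || c == '{' then pvDepthScan text delimiter rest (depth + 1)
    else if c == ')' || c == ']' || c == '}' then
      pvDepthScan text delimiter rest (max 0 (depth - 1))
    else if String.singleton c == delimiter && depth == 0 then
      (PySem.Str.slice text none (some (i : Int)),
       some (PySem.Str.slice text (some ((i : Int) + 1)) none))
    else pvDepthScan text delimiter rest depth

def split_top_level_once_py_alt (text : String) (delimiter : String) : String × Option String :=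
  pvDepthScan text delimiter (pvOutside text.toList 0 none false) 0

-- ===== PRECONDITION & SPEC =====
def Spec_split_top_level_once_py (text : String) (delimiter : String) (out : String × Option String) : Prop := out = split_top_level_once_py_alt text delimiter
instance (text : String) (delimiter : String) (out : String × Option String) : Decidable (Spec_split_top_level_once_py text delimiter out) := by unfold Spec_split_top_level_once_py; infer_instance

-- ===== CLAIM (what is proved, stated in full; the proofs are below) =====
def Claim_equal_split_top_level_once_py : Prop := ∀ (text : String) (delimiter : String), Dom_split_top_level_once_py text delimiter → Spec_split_top_level_once_py text delimiter (split_top_level_once_py text delimiter)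

-- ===== LEMMAS AND PROOFS =====

-- A's fused scan equals B's depth scan run over the filtered remainder, for any state.
theorem pvFuse (text delim : String) :
    ∀ (l : List Char) (i : Nat) (depth : Int) (quote : Option Char) (escaped : Bool),
    pvAGo text delim l i depth quote escaped =
      pvDepthScan text delim (pvOutside l i quote escaped) depth := by
  intro l
  induction l with
  | nil => intro i d q e; cases q <;> simp [pvAGo, pvOutside, pvDepthScan]
  | cons c rest ih =>
    intro i d q e
    cases q with
    | some q =>
      by_cases he : e = true
      · subst he; simp only [pvAGo, pvOutside, if_pos]; exact ih _ _ _ _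
      · have he' : e = false := by simpa using he
        subst he'
        by_cases h1 : c = '\\'
        · subst h1
          simp only [pvAGo, pvOutside]
          simp only [if_neg (by simp : ¬ false = true), if_pos (by simp : ('\\' == '\\') = true)]
          exact ih _ _ _ _
        · by_cases h2 : c = q
          · subst h2
            simp only [pvAGo, pvOutside]
            rw [if_neg (by simp), if_neg (by simp [h1]), if_pos (by simp)]
            rw [if_neg (by simp), if_neg (by simp [h1]), if_pos (by simp)]
            exact ih _ _ _ _
          · simp only [pvAGo, pvOutside]
            rw [if_neg (by simp), if_neg (by simp [h1]), if_neg (by simp [h2])]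
            rw [if_neg (by simp), if_neg (by simp [h1]), if_neg (by simp [h2])]
            exact ih _ _ _ _
    | none =>
      by_cases hq : (c == '\'' || c == '"') = true
      · simp only [pvAGo, pvOutside, if_pos hq]; exact ih _ _ _ _
      · simp only [pvAGo, pvOutside, if_neg hq, pvDepthScan]
        split_ifs with h1 h2 h3
        · exact ih _ _ _ _
        · exact ih _ _ _ _
        · rfl
        · exact ih _ _ _ _

-- ===== VERDICT (by name: the statement is the Claim_ definition above) =====
theorem split_top_level_once_py_spec : Claim_equal_split_top_level_once_py := by
  intro text delim _
  unfold Spec_split_top_level_once_py split_top_level_once_py split_top_level_once_py_alt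
  exact pvFuse text delim text.toList 0 0 none false
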